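-- pv_equiv track=rewrite | github.com/IGULEWSKI/wezascie_python | wężaście (Python)/Ćwiczenia/Ćw2.py | FiboSuma
-- ===== SOURCE A (Python) =====
-- def FiboSuma(n):
--     Fibo=[1,1,2,3,5,8,13,21]
--     for i in range(len(Fibo)-1):
--         suma=0
--         for j in range(i,len(Fibo)-1):
--             suma+=Fibo[j]
--         if suma==n:
--             return True
--     return False
--
--
--     return False
-- ===== SOURCE B (Python) =====
-- def FiboSuma(n):
--     Fibo = [1, 1, 2, 3, 5, 8, 13, 21]
--     sums = []
--     total = 0
--     for x in reversed(Fibo[:7]):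
--         total += x
--         sums.append(total)
--     return any(n == s for s in sums)
-- ===== Notes on version B (the rewrite author's own statement) =====
-- stated objective: simpler
-- what changed: Replaces A's nested recompute-from-scratch suffix sums (outer i, inner j summing Fibo[i:7]) with a single right-to-left accumulating pass building all suffix sums, followed by one any() scan.
import Mathlib
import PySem

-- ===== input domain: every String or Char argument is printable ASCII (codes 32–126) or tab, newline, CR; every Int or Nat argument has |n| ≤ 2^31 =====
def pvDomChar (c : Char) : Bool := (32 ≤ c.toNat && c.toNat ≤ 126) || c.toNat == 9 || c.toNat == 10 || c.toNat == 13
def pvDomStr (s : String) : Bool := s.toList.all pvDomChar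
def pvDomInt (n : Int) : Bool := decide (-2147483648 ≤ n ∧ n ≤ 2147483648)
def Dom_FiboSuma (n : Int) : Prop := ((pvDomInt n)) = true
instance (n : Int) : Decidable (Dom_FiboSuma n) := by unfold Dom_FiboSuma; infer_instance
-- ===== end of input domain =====

-- ===== PORT A =====
-- B replaces A's nested suffix-sum recomputation with one accumulating pass; no behavioural change.
-- inner loop: suma += Fibo[j] for j in range(i, len(Fibo)-1)
def FiboSumaInner (Fibo : List Int) (i : Int) : Int :=
  (PySem.List.pyRange i (Int.ofNat Fibo.length - 1) 1).foldl
    (fun suma j => suma + (PySem.List.pyGet? Fibo j).getD 0) 0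

-- outer loop with early return True
def FiboSumaOuter (n : Int) (Fibo : List Int) : List Int → Bool
  | [] => false
  | i :: rest =>
      if FiboSumaInner Fibo i == n then true else FiboSumaOuter n Fibo rest

def FiboSuma (n : Int) : Bool :=
  let Fibo : List Int := [1, 1, 2, 3, 5, 8, 13, 21]
  FiboSumaOuter n Fibo (PySem.List.pyRange 0 (Int.ofNat Fibo.length - 1) 1)

-- ===== PORT B =====
def FiboSuma_alt (n : Int) : Bool :=
  let Fibo : List Int := [1, 1, 2, 3, 5, 8, 13, 21]
  let sums := ((PySem.List.slice Fibo none (some 7)).reverse.foldl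
    (fun (st : Int × List Int) x => (st.1 + x, st.2 ++ [st.1 + x])) (0, [])).2
  sums.any (fun s => n == s)

-- ===== PRECONDITION & SPEC =====
def Spec_FiboSuma (n : Int) (out : Bool) : Prop := out = FiboSuma_alt n
instance (n : Int) (out : Bool) : Decidable (Spec_FiboSuma n out) := by unfold Spec_FiboSuma; infer_instance

-- ===== CLAIM (what is proved, stated in full; the proofs are below) =====
def Claim_equal_FiboSuma : Prop := ∀ (n : Int), Dom_FiboSuma n → Spec_FiboSuma n (FiboSuma n)

-- ===== LEMMAS AND PROOFS =====

-- ===== VERDICT (by name: the statement is the Claim_ definition above) =====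
theorem FiboSuma_spec : Claim_equal_FiboSuma := by
  intro n _
  unfold Spec_FiboSuma
  simp [FiboSuma, FiboSuma_alt, FiboSumaInner,
    PySem.List.pyRange, PySem.List.slice]
  simp [List.range_succ, FiboSumaOuter, FiboSumaInner,
    PySem.List.pyRange, PySem.List.pyGet?, PySem.List.pyIdx?]
  simp only [show ∀ a b : Int, (a == b) = decide (a = b) from fun a b => rfl,
    decide_eq_decide.mpr (eq_comm)]
  ac_rfl
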